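-- pv_equiv track=rewrite | github.com/liaocode/vonoroi | test02.py | findNeighbourTriangles
-- ===== SOURCE A (Python) =====
-- def isNeighbourTriangles(triangle_1, triangle_2):
-- 	"""if the two triangles are neightbour, reutrn True"""
-- 	num = 0
-- 	for p1 in triangle_1:
-- 		for p2 in triangle_2:
-- 			if p1 == p2:
-- 				num = num + 1
-- 				continue;
-- 	if num == 2:
-- 		#print 'isNeighbourTriangles return True'
-- 		return True
-- 	else:
-- 		#print 'isNeighbourTriangles return False'
-- 		return False
--
-- def findNeighbourTriangles(triangles):
-- 	""" find the neightbour triangles pairs from triangles"""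
-- 	neighbour_triangles = []
-- 	other_triangles = []
-- 	for triangle in triangles:
-- 		other_triangles = triangles[:]
-- 		other_triangles.remove(triangle)
-- 		for sec_triangle in other_triangles:
-- 			if isNeighbourTriangles(triangle, sec_triangle):
-- 				neighbour_triangle = [triangle, sec_triangle]
-- 				neighbour_triangle.sort()
-- 				if neighbour_triangle not in neighbour_triangles:
-- 					neighbour_triangles.append(neighbour_triangle)
-- 					neighbour_triangles.sort()
-- 	return neighbour_triangles
-- ===== SOURCE B (Python) =====
-- def findNeighbourTriangles(triangles):
-- 	"""find the neighbour triangle pairs via a vertex -> triangle-index bucket map"""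
-- 	buckets = {}
-- 	for i, t in enumerate(triangles):
-- 		for v in set(t):
-- 			buckets[v] = buckets.get(v, []) + [i]
-- 	cands = set()
-- 	for idxs in buckets.values():
-- 		rest = idxs
-- 		while rest:
-- 			i = rest[0]
-- 			rest = rest[1:]
-- 			for j in rest:
-- 				cands.add((i, j))
-- 	result = []
-- 	seen = set()
-- 	for i, j in cands:
-- 		t1 = triangles[i]
-- 		t2 = triangles[j]
-- 		num = 0
-- 		for p in t1:
-- 			for q in t2:
-- 				if p == q:
-- 					num = num + 1
-- 		if num == 2:
-- 			pair = sorted([t1, t2])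
-- 			key = (tuple(pair[0]), tuple(pair[1]))
-- 			if key not in seen:
-- 				seen.add(key)
-- 				result.append(pair)
-- 	result.sort()
-- 	return result
-- ===== Notes on version B (the rewrite author's own statement) =====
-- stated objective: faster
-- what changed: A scans all ordered triangle pairs (copying the list and removing the current element each outer step, re-sorting the result list after every insertion and deduplicating by a linear list scan); B builds a vertex -> triangle-index bucket map once, generates candidate index pairs only from triangles that share a vertex, deduplicates with a set, and sorts the result once at the end.
import Mathlib
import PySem

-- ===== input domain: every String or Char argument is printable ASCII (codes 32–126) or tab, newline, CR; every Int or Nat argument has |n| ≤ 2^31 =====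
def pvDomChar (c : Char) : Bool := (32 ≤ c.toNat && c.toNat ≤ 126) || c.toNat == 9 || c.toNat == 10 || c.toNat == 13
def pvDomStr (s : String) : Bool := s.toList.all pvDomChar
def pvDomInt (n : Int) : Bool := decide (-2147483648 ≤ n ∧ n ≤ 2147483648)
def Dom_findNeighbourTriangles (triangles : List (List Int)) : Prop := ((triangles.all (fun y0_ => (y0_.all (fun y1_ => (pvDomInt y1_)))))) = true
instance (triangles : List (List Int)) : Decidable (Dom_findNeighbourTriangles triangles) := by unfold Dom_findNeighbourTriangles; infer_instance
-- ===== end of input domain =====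

-- B replaces A's all-pairs scan (with its per-insertion re-sort and list-membership dedup) by a
-- vertex → triangle-index bucket map: candidate index pairs come only from triangles sharing a
-- vertex, dedup uses a set, and the result list is sorted once at the end.

-- ===== PORT A =====
def isNeighbourTriangles (triangle_1 : List Int) (triangle_2 : List Int) : Bool :=
  let num : Int := triangle_1.foldl (fun num p1 =>
    triangle_2.foldl (fun num p2 => if p1 == p2 then num + 1 else num) num) 0
  if num == 2 then true else false

def findNeighbourTriangles (triangles : List (List Int)) : List (List (List Int)) :=
  triangles.foldl (fun neighbour_triangles triangle =>
    -- other_triangles = triangles[:]; other_triangles.remove(triangle) — triangle ∈ triangles, so remove? never fails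
    let other_triangles := (PySem.List.remove? triangles triangle).getD []
    other_triangles.foldl (fun neighbour_triangles sec_triangle =>
      if isNeighbourTriangles triangle sec_triangle then
        let neighbour_triangle := PySem.List.sorted [triangle, sec_triangle] (fun x => x)
        if neighbour_triangle ∈ neighbour_triangles then neighbour_triangles
        else PySem.List.sorted (neighbour_triangles ++ [neighbour_triangle]) (fun x => x)
      else neighbour_triangles) neighbour_triangles) []

-- ===== PORT B =====
-- Source B's 'while rest: i = rest[0]; rest = rest[1:]; for j in rest: cands.add((i, j))'
def pvPairsLoop (rest : List Int) (cands : PySem.Set (Int × Int)) : PySem.Set (Int × Int) :=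
  match rest with
  | [] => cands
  | i :: rest' => pvPairsLoop rest' (rest'.foldl (fun cands j => cands.add (i, j)) cands)

def findNeighbourTriangles_alt (triangles : List (List Int)) : List (List (List Int)) :=
  let buckets : PySem.Dict Int (List Int) :=
    (PySem.List.enumerate triangles 0).foldl (fun buckets it =>
      (PySem.Set.ofList it.2).foldl (fun buckets v =>
        buckets.insert v (buckets.getD v [] ++ [it.1])) buckets) PySem.Dict.empty
  let cands : PySem.Set (Int × Int) :=
    buckets.values.foldl (fun cands idxs => pvPairsLoop idxs cands) []
  let rs := cands.foldl (fun (rs : List (List (List Int)) × PySem.Set (List (List Int))) ij =>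
      -- indices in cands come from enumerate, so triangles[i] never raises
      let t1 := (PySem.List.pyGet? triangles ij.1).getD []
      let t2 := (PySem.List.pyGet? triangles ij.2).getD []
      let num : Int := t1.foldl (fun num p =>
        t2.foldl (fun num q => if p == q then num + 1 else num) num) 0
      if num == 2 then
        let pair := PySem.List.sorted [t1, t2] (fun x => x)
        -- 'seen' holds the pair itself; Source B's tuple-of-tuples key is an injective image of the pair
        if pair ∈ rs.2 then rs else (rs.1 ++ [pair], rs.2.add pair)
      else rs) (([], []) : List (List (List Int)) × PySem.Set (List (List Int)))
  PySem.List.sorted rs.1 (fun x => x)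

-- ===== PRECONDITION & SPEC =====
def Spec_findNeighbourTriangles (triangles : List (List Int)) (out : List (List (List Int))) : Prop := out = findNeighbourTriangles_alt triangles
instance (triangles : List (List Int)) (out : List (List (List Int))) : Decidable (Spec_findNeighbourTriangles triangles out) := by unfold Spec_findNeighbourTriangles; infer_instance

-- ===== CLAIM (what is proved, stated in full; the proofs are below) =====
def Claim_equal_findNeighbourTriangles : Prop := ∀ (triangles : List (List Int)), Dom_findNeighbourTriangles triangles → Spec_findNeighbourTriangles triangles (findNeighbourTriangles triangles)

-- ===== LEMMAS AND PROOFS =====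

def pvNum (t u : List Int) : Int :=
  t.foldl (fun num p => u.foldl (fun num q => if p == q then num + 1 else num) num) 0

def pvSP (t u : List Int) : List (List Int) := PySem.List.sorted [t, u] (fun x => x)

theorem pvSortedInst1 (r : List (List Int)) :
    PySem.List.sorted r (fun x => x) false = @PySem.List.sorted _ _ _ LinearOrder.toDecidableLT r (fun x => x) false := by
  congr 1

theorem pvInner_eq (u : List Int) (p : Int) (n : Int) :
    u.foldl (fun num q => if p == q then num + 1 else num) n = n + (u.count p : Int) := by
  rw [PySem.List.foldl_count_if]
  congr 2
  unfold List.count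
  exact List.countP_congr (by intro a _; simp only [beq_iff_eq]; exact eq_comm)

theorem pvNum_aux (t u : List Int) (a : Int) :
    t.foldl (fun num p => u.foldl (fun num q => if p == q then num + 1 else num) num) a
      = a + (t.map (fun p => (u.count p : Int))).sum := by
  induction t generalizing a with
  | nil => simp
  | cons p t ih =>
    rw [List.foldl_cons, ih, pvInner_eq]
    simp only [List.map_cons, List.sum_cons]
    ring

theorem pvNum_eq_sum (t u : List Int) :
    pvNum t u = (t.map (fun p => (u.count p : Int))).sum := by
  rw [pvNum, pvNum_aux, zero_add]

theorem pvNum_symm (t u : List Int) : pvNum t u = pvNum u t := by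
  rw [pvNum_eq_sum, pvNum_eq_sum]
  induction t with
  | nil => simp
  | cons a t ih =>
    simp only [List.map_cons, List.sum_cons, ih, List.count_cons]
    push_cast
    rw [PySem.List.sum_map_add_int]
    have h2 : (u.map (fun p => if (a == p) = true then (1:Int) else 0)).sum = (u.count a : Int) := by
      rw [PySem.List.sum_map_ite_one_zero]
      norm_cast
      unfold List.count
      exact List.countP_congr (by intro x _; simp only [beq_iff_eq]; exact eq_comm)
    rw [h2]
    ring

theorem pvNum_two_shared {t u : List Int} (h : pvNum t u = 2) : ∃ v, v ∈ t ∧ v ∈ u := by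
  by_contra hc
  push Not at hc
  rw [pvNum_eq_sum] at h
  rw [List.sum_eq_zero] at h
  · exact absurd h (by norm_num)
  · intro x hx
    obtain ⟨p, hp, rfl⟩ := List.mem_map.1 hx
    simp [List.count_eq_zero_of_not_mem (hc p hp)]

theorem pvSP_symm (t u : List Int) : pvSP t u = pvSP u t := by
  unfold pvSP
  rw [pvSortedInst1, pvSortedInst1]
  exact PySem.List.sorted_eq_sorted_of_perm _ _ _ (fun _ _ h => h) (List.Perm.swap u t [])

theorem pvIsNeighbour_iff (t u : List Int) : isNeighbourTriangles t u = true ↔ pvNum t u = 2 := by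
  simp [isNeighbourTriangles, pvNum]

theorem pvSortedInst2 (r : List (List (List Int))) :
    PySem.List.sorted r (fun x => x) false = @PySem.List.sorted _ _ _ LinearOrder.toDecidableLT r (fun x => x) false := by
  congr 1

theorem A_inner (t : List Int) (os : List (List Int)) (acc : List (List (List Int)))
    (P : List (List Int) → Prop)
    (h1 : acc.Nodup) (h2 : acc.Pairwise (fun a b => a ≤ b)) (h3 : ∀ x, x ∈ acc ↔ P x) :
    (os.foldl (fun neighbour_triangles sec_triangle =>
      if isNeighbourTriangles t sec_triangle then
        if PySem.List.sorted [t, sec_triangle] (fun x => x) ∈ neighbour_triangles then neighbour_triangles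
        else PySem.List.sorted (neighbour_triangles ++ [PySem.List.sorted [t, sec_triangle] (fun x => x)]) (fun x => x)
      else neighbour_triangles) acc).Nodup ∧
    (os.foldl (fun neighbour_triangles sec_triangle =>
      if isNeighbourTriangles t sec_triangle then
        if PySem.List.sorted [t, sec_triangle] (fun x => x) ∈ neighbour_triangles then neighbour_triangles
        else PySem.List.sorted (neighbour_triangles ++ [PySem.List.sorted [t, sec_triangle] (fun x => x)]) (fun x => x)
      else neighbour_triangles) acc).Pairwise (fun a b => a ≤ b) ∧
    (∀ x, x ∈ (os.foldl (fun neighbour_triangles sec_triangle =>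
      if isNeighbourTriangles t sec_triangle then
        if PySem.List.sorted [t, sec_triangle] (fun x => x) ∈ neighbour_triangles then neighbour_triangles
        else PySem.List.sorted (neighbour_triangles ++ [PySem.List.sorted [t, sec_triangle] (fun x => x)]) (fun x => x)
      else neighbour_triangles) acc) ↔ (P x ∨ ∃ u ∈ os, pvNum t u = 2 ∧ x = pvSP t u)) := by
  induction os generalizing acc P with
  | nil => exact ⟨h1, h2, fun x => by simp only [List.foldl_nil]; rw [h3 x]; simp⟩
  | cons o os ih =>
    simp only [List.foldl_cons]
    by_cases hq : isNeighbourTriangles t o = true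
    · rw [if_pos hq]
      by_cases hm : PySem.List.sorted [t, o] (fun x => x) ∈ acc
      · rw [if_pos hm]
        obtain ⟨g1, g2, g3⟩ := ih acc (fun x => P x ∨ (pvNum t o = 2 ∧ x = pvSP t o))
          h1 h2 (fun x => by
            constructor
            · intro hx; exact Or.inl ((h3 x).1 hx)
            · rintro (hx | ⟨_, rfl⟩)
              · exact (h3 x).2 hx
              · exact hm)
        refine ⟨g1, g2, fun x => ?_⟩
        rw [g3 x]
        simp only [List.mem_cons]
        constructor
        · rintro ((hp | ⟨hn, rfl⟩) | ⟨u, hu, h⟩)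
          · exact Or.inl hp
          · exact Or.inr ⟨o, Or.inl rfl, hn, rfl⟩
          · exact Or.inr ⟨u, Or.inr hu, h⟩
        · rintro (hp | ⟨u, (rfl | hu), h⟩)
          · exact Or.inl (Or.inl hp)
          · exact Or.inl (Or.inr ⟨h.1, h.2⟩)
          · exact Or.inr ⟨u, hu, h⟩
      · rw [if_neg hm]
        have hperm := PySem.List.sorted_perm (acc ++ [PySem.List.sorted [t, o] (fun x => x)]) (fun x : List (List Int) => x) false
        obtain ⟨g1, g2, g3⟩ := ih (PySem.List.sorted (acc ++ [PySem.List.sorted [t, o] (fun x => x)]) (fun x => x))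
          (fun x => P x ∨ (pvNum t o = 2 ∧ x = pvSP t o))
          (hperm.nodup_iff.2 (by simp [List.nodup_append, h1]; intro a ha he; exact hm (he ▸ ha)))
          (by rw [pvSortedInst2]; exact PySem.List.sorted_pairwise _ _)
          (fun x => by
            rw [PySem.List.mem_sorted]
            simp only [List.mem_append, List.mem_singleton]
            rw [h3 x]
            constructor
            · rintro (hp | rfl)
              · exact Or.inl hp
              · exact Or.inr ⟨(pvIsNeighbour_iff t o).1 hq, rfl⟩
            · rintro (hp | ⟨_, rfl⟩)
              · exact Or.inl hp
              · exact Or.inr rfl)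
        refine ⟨g1, g2, fun x => ?_⟩
        rw [g3 x]
        constructor
        · rintro ((hp | ⟨hn, rfl⟩) | ⟨u, hu, h⟩)
          · exact Or.inl hp
          · exact Or.inr ⟨o, List.mem_cons_self .., hn, rfl⟩
          · exact Or.inr ⟨u, List.mem_cons_of_mem _ hu, h⟩
        · rintro (hp | ⟨u, hu, h⟩)
          · exact Or.inl (Or.inl hp)
          · rcases List.mem_cons.1 hu with rfl | hu'
            · exact Or.inl (Or.inr ⟨h.1, h.2⟩)
            · exact Or.inr ⟨u, hu', h⟩
    · rw [if_neg hq]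
      obtain ⟨g1, g2, g3⟩ := ih acc P h1 h2 h3
      refine ⟨g1, g2, fun x => ?_⟩
      rw [g3 x]
      constructor
      · rintro (hp | ⟨u, hu, h⟩)
        · exact Or.inl hp
        · exact Or.inr ⟨u, List.mem_cons_of_mem _ hu, h⟩
      · rintro (hp | ⟨u, hu, h⟩)
        · exact Or.inl hp
        · rcases List.mem_cons.1 hu with rfl | hu'
          · exact absurd ((pvIsNeighbour_iff t u).2 h.1) hq
          · exact Or.inr ⟨u, hu', h⟩

theorem A_outer (l : List (List Int)) (ts : List (List Int)) (hsub : ∀ t ∈ ts, t ∈ l)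
    (acc : List (List (List Int))) (P : List (List Int) → Prop)
    (h1 : acc.Nodup) (h2 : acc.Pairwise (fun a b => a ≤ b)) (h3 : ∀ x, x ∈ acc ↔ P x) :
    (ts.foldl (fun neighbour_triangles triangle =>
      ((PySem.List.remove? l triangle).getD []).foldl (fun neighbour_triangles sec_triangle =>
        if isNeighbourTriangles triangle sec_triangle then
          if PySem.List.sorted [triangle, sec_triangle] (fun x => x) ∈ neighbour_triangles then neighbour_triangles
          else PySem.List.sorted (neighbour_triangles ++ [PySem.List.sorted [triangle, sec_triangle] (fun x => x)]) (fun x => x)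
        else neighbour_triangles) neighbour_triangles) acc).Nodup ∧
    (ts.foldl (fun neighbour_triangles triangle =>
      ((PySem.List.remove? l triangle).getD []).foldl (fun neighbour_triangles sec_triangle =>
        if isNeighbourTriangles triangle sec_triangle then
          if PySem.List.sorted [triangle, sec_triangle] (fun x => x) ∈ neighbour_triangles then neighbour_triangles
          else PySem.List.sorted (neighbour_triangles ++ [PySem.List.sorted [triangle, sec_triangle] (fun x => x)]) (fun x => x)
        else neighbour_triangles) neighbour_triangles) acc).Pairwise (fun a b => a ≤ b) ∧
    (∀ x, x ∈ (ts.foldl (fun neighbour_triangles triangle =>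
      ((PySem.List.remove? l triangle).getD []).foldl (fun neighbour_triangles sec_triangle =>
        if isNeighbourTriangles triangle sec_triangle then
          if PySem.List.sorted [triangle, sec_triangle] (fun x => x) ∈ neighbour_triangles then neighbour_triangles
          else PySem.List.sorted (neighbour_triangles ++ [PySem.List.sorted [triangle, sec_triangle] (fun x => x)]) (fun x => x)
        else neighbour_triangles) neighbour_triangles) acc) ↔
      (P x ∨ ∃ t ∈ ts, ∃ u ∈ l.erase t, pvNum t u = 2 ∧ x = pvSP t u)) := by
  induction ts generalizing acc P with
  | nil => exact ⟨h1, h2, fun x => by simp only [List.foldl_nil]; rw [h3 x]; simp⟩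
  | cons t ts ih =>
    simp only [List.foldl_cons]
    rw [PySem.List.remove?_eq_some_erase l t (hsub t (List.mem_cons_self ..)), Option.getD_some]
    obtain ⟨g1, g2, g3⟩ := A_inner t (l.erase t) acc P h1 h2 h3
    obtain ⟨k1, k2, k3⟩ := ih (fun t ht => hsub t (List.mem_cons_of_mem _ ht)) _
      (fun x => P x ∨ ∃ u ∈ l.erase t, pvNum t u = 2 ∧ x = pvSP t u) g1 g2 g3
    refine ⟨k1, k2, fun x => ?_⟩
    rw [k3 x]
    constructor
    · rintro ((hp | hu) | ⟨t', ht', h⟩)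
      · exact Or.inl hp
      · exact Or.inr ⟨t, List.mem_cons_self .., hu⟩
      · exact Or.inr ⟨t', List.mem_cons_of_mem _ ht', h⟩
    · rintro (hp | ⟨t', ht', h⟩)
      · exact Or.inl (Or.inl hp)
      · rcases List.mem_cons.1 ht' with rfl | ht''
        · exact Or.inl (Or.inr h)
        · exact Or.inr ⟨t', ht'', h⟩

theorem A_char (l : List (List Int)) :
    (findNeighbourTriangles l).Nodup ∧
    (findNeighbourTriangles l).Pairwise (fun a b => a ≤ b) ∧
    (∀ x, x ∈ findNeighbourTriangles l ↔
      ∃ t ∈ l, ∃ u ∈ l.erase t, pvNum t u = 2 ∧ x = pvSP t u) := by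
  obtain ⟨g1, g2, g3⟩ := A_outer l l (fun _ h => h) [] (fun _ => False)
    (List.nodup_nil) (List.Pairwise.nil) (fun x => by simp)
  unfold findNeighbourTriangles
  exact ⟨g1, g2, fun x => by rw [g3 x]; simp⟩

-- ===== B side =====

def pvBuckets (triangles : List (List Int)) : PySem.Dict Int (List Int) :=
  (PySem.List.enumerate triangles 0).foldl (fun buckets it =>
    (PySem.Set.ofList it.2).foldl (fun buckets v =>
      buckets.insert v (buckets.getD v [] ++ [it.1])) buckets) PySem.Dict.empty

def pvCands (triangles : List (List Int)) : PySem.Set (Int × Int) :=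
  (pvBuckets triangles).values.foldl (fun cands idxs => pvPairsLoop idxs cands) []

def pvFlat (l : List (List Int)) : List (Int × Int) :=
  (PySem.List.enumerate l 0).flatMap (fun it => (PySem.Set.ofList it.2).map (fun v => (v, it.1)))

theorem pvBuckets_eq_flat (l : List (List Int)) :
    pvBuckets l = (pvFlat l).foldl (fun d p => d.modify p.1 [] (fun b => b ++ [p.2])) PySem.Dict.empty := by
  unfold pvFlat
  rw [List.foldl_flatMap]
  unfold pvBuckets
  refine PySem.List.foldl_congr_mem _ _ _ _ ?_
  intro acc it _
  rw [List.foldl_map]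
  rfl

theorem pvNodupFilterBeq (t : List Int) (v : Int) (h : t.Nodup) :
    t.filter (fun w => w == v) = if v ∈ t then [v] else [] := by
  induction t with
  | nil => simp
  | cons a t ih =>
    simp only [List.nodup_cons] at h
    rw [List.filter_cons]
    by_cases hav : a = v
    · subst hav
      simp only [beq_self_eq_true, if_pos, List.mem_cons, true_or]
      rw [List.filter_eq_nil_iff.2 (by intro b hb; simp only [beq_iff_eq]; rintro rfl; exact h.1 hb)]
    · have hf : (a == v) = false := by simp [hav]
      rw [hf, ih h.2]
      simp only [List.mem_cons]
      by_cases hv : v ∈ t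
      · simp [hv]
      · simp [hv]
        exact fun hc => hav hc.symm

theorem pvFlatMapIte {α β : Type} (l : List α) (p : α → Bool) (f : α → β) :
    l.flatMap (fun x => if p x then [f x] else []) = (l.filter p).map f := by
  induction l with
  | nil => rfl
  | cons a t ih => by_cases h : p a <;> simp [h, ih]

theorem pvBucket_getD (l : List (List Int)) (v : Int) :
    (pvBuckets l).getD v [] =
      ((PySem.List.enumerate l 0).filter (fun it => decide (v ∈ it.2))).map (fun it => it.1) := by
  rw [pvBuckets_eq_flat, PySem.Dict.getD_foldl_modify_append]
  rw [PySem.Dict.getD_empty]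
  unfold pvFlat
  rw [List.filter_flatMap]
  simp only [List.nil_append]
  have hblock : ∀ it : Int × List Int,
      List.filter (fun p => p.1 == v) ((PySem.Set.ofList it.2).map (fun w => (w, it.1)))
        = if decide (v ∈ it.2) then [(v, it.1)] else [] := by
    intro it
    rw [List.filter_map]
    rw [show ((fun (p : Int × Int) => p.1 == v) ∘ (fun w => (w, it.1))) = (fun w => w == v) by rfl,
      pvNodupFilterBeq _ v (PySem.Set.nodup_ofList it.2)]
    by_cases hm : v ∈ it.2
    · rw [if_pos ((PySem.Set.mem_ofList _ _).2 hm)]; simp [hm]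
    · rw [if_neg (fun hc => hm ((PySem.Set.mem_ofList _ _).1 hc))]; simp [hm]
  have : ∀ its : List (Int × List Int), (its.flatMap (fun it => List.filter (fun p => p.1 == v) ((PySem.Set.ofList it.2).map (fun w => (w, it.1))))) = its.flatMap (fun it => if decide (v ∈ it.2) then [(v, it.1)] else []) := by
    intro its; exact List.flatMap_congr (fun it _ => hblock it)
  rw [this, show (fun (it : Int × List Int) => if decide (v ∈ it.2) then [(v, it.1)] else []) = (fun it => if decide (v ∈ it.2) then [((fun it : Int × List Int => (v, it.1)) it)] else []) from rfl, pvFlatMapIte]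
  rw [List.map_map]
  rfl

theorem pvBucket_mem (l : List (List Int)) (v : Int) (j : Int) :
    j ∈ (pvBuckets l).getD v [] ↔ ∃ k : Nat, ∃ (h : k < l.length), j = (k : Int) ∧ v ∈ l[k] := by
  rw [pvBucket_getD]
  simp only [List.mem_map, List.mem_filter, PySem.List.mem_enumerate_iff]
  constructor
  · rintro ⟨it, ⟨⟨k, hk, rfl⟩, hv⟩, rfl⟩
    exact ⟨k, hk, by simp, by simpa using hv⟩
  · rintro ⟨k, hk, rfl, hv⟩
    exact ⟨((k : Int), l[k]), ⟨⟨k, hk, by simp⟩, by simpa using hv⟩, rfl⟩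

theorem pvBucket_pairwise (l : List (List Int)) (v : Int) :
    ((pvBuckets l).getD v []).Pairwise (· < ·) := by
  rw [pvBucket_getD]
  rw [List.pairwise_map]
  exact (PySem.List.pairwise_lt_enumerate l 0).filter _

theorem pvBuckets_keys_nodup (l : List (List Int)) : (pvBuckets l).keys.Nodup := by
  rw [pvBuckets_eq_flat]
  exact PySem.Dict.nodup_keys_foldl_modify_key _ (fun p : Int × Int => p.1) [] (fun _ (p : Int × Int) => (· ++ [p.2])) _ (by simp)

theorem pvPairsLoop_mem (rest : List Int) (hp : rest.Pairwise (· < ·)) (s : PySem.Set (Int × Int)) (p : Int × Int) :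
    p ∈ pvPairsLoop rest s ↔ p ∈ s ∨ (p.1 ∈ rest ∧ p.2 ∈ rest ∧ p.1 < p.2) := by
  induction rest generalizing s with
  | nil => simp [pvPairsLoop]
  | cons i rest ih =>
    rw [List.pairwise_cons] at hp
    rw [pvPairsLoop, ih hp.2, PySem.Set.mem_foldl_add]
    constructor
    · rintro ((hs | ⟨j, hj, rfl⟩) | ⟨h1, h2, h3⟩)
      · exact Or.inl hs
      · exact Or.inr ⟨List.mem_cons_self .., List.mem_cons_of_mem _ hj, hp.1 j hj⟩
      · exact Or.inr ⟨List.mem_cons_of_mem _ h1, List.mem_cons_of_mem _ h2, h3⟩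
    · rintro (hs | ⟨h1, h2, h3⟩)
      · exact Or.inl (Or.inl hs)
      · rcases List.mem_cons.1 h1 with he1 | h1'
        · rcases List.mem_cons.1 h2 with he2 | h2'
          · exact absurd h3 (by rw [he1, he2]; exact lt_irrefl i)
          · exact Or.inl (Or.inr ⟨p.2, h2', by rw [← he1]⟩)
        · rcases List.mem_cons.1 h2 with he2 | h2'
          · exact absurd (he2 ▸ h3) (not_lt.2 (le_of_lt (hp.1 _ h1')))
          · exact Or.inr ⟨h1', h2', h3⟩

theorem pvCandsFold_mem (vs : List (List Int)) (hvs : ∀ idxs ∈ vs, idxs.Pairwise (· < ·))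
    (s : PySem.Set (Int × Int)) (p : Int × Int) :
    p ∈ vs.foldl (fun cands idxs => pvPairsLoop idxs cands) s ↔
      p ∈ s ∨ ∃ idxs ∈ vs, p.1 ∈ idxs ∧ p.2 ∈ idxs ∧ p.1 < p.2 := by
  induction vs generalizing s with
  | nil => simp
  | cons idxs vs ih =>
    rw [List.foldl_cons, ih (fun i hi => hvs i (List.mem_cons_of_mem _ hi)),
      pvPairsLoop_mem idxs (hvs idxs (List.mem_cons_self ..))]
    constructor
    · rintro ((hs | h) | ⟨i, hi, h⟩)
      · exact Or.inl hs
      · exact Or.inr ⟨idxs, List.mem_cons_self .., h⟩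
      · exact Or.inr ⟨i, List.mem_cons_of_mem _ hi, h⟩
    · rintro (hs | ⟨i, hi, h⟩)
      · exact Or.inl (Or.inl hs)
      · rcases List.mem_cons.1 hi with rfl | hi'
        · exact Or.inl (Or.inr h)
        · exact Or.inr ⟨i, hi', h⟩

theorem pvCands_mem (l : List (List Int)) (p : Int × Int) :
    p ∈ pvCands l ↔ ∃ v : Int, p.1 ∈ (pvBuckets l).getD v [] ∧ p.2 ∈ (pvBuckets l).getD v [] ∧ p.1 < p.2 := by
  unfold pvCands
  rw [PySem.Dict.values_eq_map_keys _ (pvBuckets_keys_nodup l) []]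
  rw [pvCandsFold_mem _ (by
    intro idxs hidxs
    obtain ⟨v, _, rfl⟩ := List.mem_map.1 hidxs
    exact pvBucket_pairwise l v)]
  simp only [List.not_mem_nil, false_or, List.mem_map]
  constructor
  · rintro ⟨idxs, ⟨v, hv, rfl⟩, h⟩
    exact ⟨v, h⟩
  · rintro ⟨v, h1, h2, h3⟩
    have hvk : v ∈ (pvBuckets l).keys := by
      by_cases hc : (pvBuckets l).contains v = true
      · exact (PySem.Dict.contains_iff_mem_keys _ _).1 hc
      · rw [PySem.Dict.getD_of_not_contains _ _ (by simpa using hc)] at h1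
        exact absurd h1 (List.not_mem_nil)
    exact ⟨(pvBuckets l).getD v [], ⟨v, hvk, rfl⟩, h1, h2, h3⟩

def pvT (l : List (List Int)) (i : Int) : List Int := (PySem.List.pyGet? l i).getD []

def pvStepB (l : List (List Int)) (rs : List (List (List Int)) × PySem.Set (List (List Int)))
    (ij : Int × Int) : List (List (List Int)) × PySem.Set (List (List Int)) :=
  if pvNum (pvT l ij.1) (pvT l ij.2) == 2 then
    if pvSP (pvT l ij.1) (pvT l ij.2) ∈ rs.2 then rs
    else (rs.1 ++ [pvSP (pvT l ij.1) (pvT l ij.2)], rs.2.add (pvSP (pvT l ij.1) (pvT l ij.2)))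
  else rs

theorem B_unfold (l : List (List Int)) :
    findNeighbourTriangles_alt l =
      PySem.List.sorted ((pvCands l).foldl (pvStepB l) ([], [])).1 (fun x => x) := rfl

theorem B_loop (l : List (List Int)) (cl : List (Int × Int))
    (res : List (List (List Int))) (seen : PySem.Set (List (List Int))) (P : List (List Int) → Prop)
    (h1 : res.Nodup) (h2 : ∀ x, x ∈ res ↔ x ∈ seen) (h3 : ∀ x, x ∈ res ↔ P x) :
    (cl.foldl (pvStepB l) (res, seen)).1.Nodup ∧
    (∀ x, x ∈ (cl.foldl (pvStepB l) (res, seen)).1 ↔ x ∈ (cl.foldl (pvStepB l) (res, seen)).2) ∧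
    (∀ x, x ∈ (cl.foldl (pvStepB l) (res, seen)).1 ↔
      P x ∨ ∃ ij ∈ cl, pvNum (pvT l ij.1) (pvT l ij.2) = 2 ∧ x = pvSP (pvT l ij.1) (pvT l ij.2)) := by
  induction cl generalizing res seen P with
  | nil =>
    simp only [List.foldl_nil]
    exact ⟨h1, h2, fun x => by rw [h3 x]; simp⟩
  | cons ij cl ih =>
    rw [List.foldl_cons]
    by_cases hq : pvNum (pvT l ij.1) (pvT l ij.2) = 2
    · by_cases hm : pvSP (pvT l ij.1) (pvT l ij.2) ∈ seen
      · have heq : pvStepB l (res, seen) ij = (res, seen) := by unfold pvStepB; simp [hq, hm]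
        rw [heq]
        obtain ⟨g1, g2, g3⟩ := ih res seen
          (fun x => P x ∨ (pvNum (pvT l ij.1) (pvT l ij.2) = 2 ∧ x = pvSP (pvT l ij.1) (pvT l ij.2)))
          h1 h2
          (fun x => ⟨fun hx => Or.inl ((h3 x).1 hx), by
            rintro (hx | ⟨_, rfl⟩)
            · exact (h3 _).2 hx
            · exact (h2 _).2 hm⟩)
        refine ⟨g1, g2, fun x => ?_⟩
        rw [g3 x]
        constructor
        · rintro ((hp | ⟨hn, rfl⟩) | ⟨ij', hij', h⟩)
          · exact Or.inl hp
          · exact Or.inr ⟨ij, List.mem_cons_self .., hn, rfl⟩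
          · exact Or.inr ⟨ij', List.mem_cons_of_mem _ hij', h⟩
        · rintro (hp | ⟨ij', hij', h⟩)
          · exact Or.inl (Or.inl hp)
          · rcases List.mem_cons.1 hij' with rfl | hij''
            · exact Or.inl (Or.inr h)
            · exact Or.inr ⟨ij', hij'', h⟩
      · have heq : pvStepB l (res, seen) ij =
            (res ++ [pvSP (pvT l ij.1) (pvT l ij.2)], seen.add (pvSP (pvT l ij.1) (pvT l ij.2))) := by
          unfold pvStepB; simp [hq, hm]
        rw [heq]
        have hpnr : pvSP (pvT l ij.1) (pvT l ij.2) ∉ res := fun hc => hm ((h2 _).1 hc)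
        obtain ⟨g1, g2, g3⟩ := ih (res ++ [pvSP (pvT l ij.1) (pvT l ij.2)])
          (seen.add (pvSP (pvT l ij.1) (pvT l ij.2)))
          (fun x => P x ∨ (pvNum (pvT l ij.1) (pvT l ij.2) = 2 ∧ x = pvSP (pvT l ij.1) (pvT l ij.2)))
          (by simp [List.nodup_append, h1]; intro a ha he; exact hpnr (he ▸ ha))
          (fun x => by
            rw [List.mem_append, PySem.Set.mem_add, h2 x]
            simp)
          (fun x => by
            rw [List.mem_append]
            simp only [List.mem_singleton]
            rw [h3 x]
            constructor
            · rintro (hp | rfl)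
              · exact Or.inl hp
              · exact Or.inr ⟨hq, rfl⟩
            · rintro (hp | ⟨_, rfl⟩)
              · exact Or.inl hp
              · exact Or.inr rfl)
        refine ⟨g1, g2, fun x => ?_⟩
        rw [g3 x]
        constructor
        · rintro ((hp | ⟨hn, rfl⟩) | ⟨ij', hij', h⟩)
          · exact Or.inl hp
          · exact Or.inr ⟨ij, List.mem_cons_self .., hn, rfl⟩
          · exact Or.inr ⟨ij', List.mem_cons_of_mem _ hij', h⟩
        · rintro (hp | ⟨ij', hij', h⟩)
          · exact Or.inl (Or.inl hp)
          · rcases List.mem_cons.1 hij' with rfl | hij''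
            · exact Or.inl (Or.inr h)
            · exact Or.inr ⟨ij', hij'', h⟩
    · have heq : pvStepB l (res, seen) ij = (res, seen) := by unfold pvStepB; simp [hq]
      rw [heq]
      obtain ⟨g1, g2, g3⟩ := ih res seen P h1 h2 h3
      refine ⟨g1, g2, fun x => ?_⟩
      rw [g3 x]
      constructor
      · rintro (hp | ⟨ij', hij', h⟩)
        · exact Or.inl hp
        · exact Or.inr ⟨ij', List.mem_cons_of_mem _ hij', h⟩
      · rintro (hp | ⟨ij', hij', h⟩)
        · exact Or.inl hp
        · rcases List.mem_cons.1 hij' with rfl | hij''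
          · exact absurd h.1 hq
          · exact Or.inr ⟨ij', hij'', h⟩

theorem pvT_natCast (l : List (List Int)) (a : Nat) (h : a < l.length) : pvT l (a : Int) = l[a] := by
  unfold pvT
  rw [PySem.List.pyGet?_natCast, List.getElem?_eq_getElem h]
  rfl

theorem B_char (l : List (List Int)) :
    ∃ r : List (List (List Int)), findNeighbourTriangles_alt l = PySem.List.sorted r (fun x => x) ∧
      r.Nodup ∧
      (∀ x, x ∈ r ↔ ∃ a b : Nat, ∃ (hb : b < l.length) (ha : a < l.length),
        a < b ∧ pvNum l[a] l[b] = 2 ∧ x = pvSP l[a] l[b]) := by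
  refine ⟨((pvCands l).foldl (pvStepB l) ([], [])).1, B_unfold l, ?_, ?_⟩
  · exact (B_loop l (pvCands l) [] [] (fun _ => False) List.nodup_nil (fun x => by simp) (fun x => by simp)).1
  · intro x
    rw [(B_loop l (pvCands l) [] [] (fun _ => False) List.nodup_nil (fun x => by simp) (fun x => by simp)).2.2 x]
    simp only [false_or]
    constructor
    · rintro ⟨ij, hij, hq, rfl⟩
      obtain ⟨v, hv1, hv2, hlt⟩ := (pvCands_mem l ij).1 hij
      obtain ⟨a, ha, he1, hva⟩ := (pvBucket_mem l v ij.1).1 hv1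
      obtain ⟨b, hb, he2, hvb⟩ := (pvBucket_mem l v ij.2).1 hv2
      rw [he1, he2] at hq hlt ⊢
      rw [pvT_natCast l a ha, pvT_natCast l b hb] at hq
      exact ⟨a, b, hb, ha, by exact_mod_cast hlt, hq, by rw [pvT_natCast l a ha, pvT_natCast l b hb]⟩
    · rintro ⟨a, b, hb, ha, hab, hq, rfl⟩
      obtain ⟨v, hva, hvb⟩ := pvNum_two_shared hq
      refine ⟨((a : Int), (b : Int)), ?_, ?_, ?_⟩
      · refine (pvCands_mem l _).2 ⟨v, ?_, ?_, by show ((a:Int) < (b:Int)); exact_mod_cast hab⟩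
        · exact (pvBucket_mem l v _).2 ⟨a, ha, rfl, hva⟩
        · exact (pvBucket_mem l v _).2 ⟨b, hb, rfl, hvb⟩
      · rw [pvT_natCast l a ha, pvT_natCast l b hb]; exact hq
      · rw [pvT_natCast l a ha, pvT_natCast l b hb]

def pvPS (l : List (List Int)) (x : List (List Int)) : Prop :=
  ∃ t u xs ys zs, l = xs ++ t :: ys ++ u :: zs ∧ pvNum t u = 2 ∧ x = pvSP t u

theorem pvIdxSplit (l : List (List Int)) (a b : Nat) (hab : a < b) (hb : b < l.length) :
    ∃ xs ys zs, l = xs ++ l[a]'(by omega) :: ys ++ l[b] :: zs := by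
  have ha : a < l.length := by omega
  refine ⟨l.take a, (l.drop (a+1)).take (b-(a+1)), l.drop (b+1), ?_⟩
  have h1 : (l.drop (a+1)).drop (b-(a+1)) = l.drop b := by
    rw [List.drop_drop]
    congr 1
    omega
  have h2 : l.drop (a+1) = (l.drop (a+1)).take (b-(a+1)) ++ l[b] :: l.drop (b+1) := by
    conv_lhs => rw [← List.take_append_drop (b-(a+1)) (l.drop (a+1))]
    rw [h1, List.drop_eq_getElem_cons hb]
  conv_lhs => rw [← List.take_append_drop a l, List.drop_eq_getElem_cons ha, h2]
  simp

theorem pvSplitIdx (l : List (List Int)) (t u : List Int) (xs ys zs : List (List Int))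
    (hl : l = xs ++ t :: ys ++ u :: zs) :
    ∃ a b : Nat, ∃ (hb : b < l.length) (ha : a < l.length), a < b ∧ l[a]? = some t ∧ l[b]? = some u := by
  subst hl
  refine ⟨xs.length, xs.length + 1 + ys.length,
    by simp only [List.length_append, List.length_cons]; omega,
    by simp only [List.length_append, List.length_cons]; omega,
    by omega, ?_, ?_⟩
  · rw [List.getElem?_append_left (by simp only [List.length_append, List.length_cons]; omega)]
    rw [List.getElem?_append_right (by omega)]
    simp
  · rw [List.getElem?_append_right (by simp only [List.length_append, List.length_cons]; omega)]
    simp only [List.length_append, List.length_cons]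
    rw [show xs.length + 1 + ys.length - (xs.length + (ys.length + 1)) = 0 by omega]
    rfl

theorem A_mem_iff_PS (l : List (List Int)) (x : List (List Int)) :
    (∃ t ∈ l, ∃ u ∈ l.erase t, pvNum t u = 2 ∧ x = pvSP t u) ↔ pvPS l x := by
  constructor
  · rintro ⟨t, ht, u, hu, hq, rfl⟩
    obtain ⟨l₁, l₂, _, hl, he⟩ := List.exists_erase_eq ht
    rw [he] at hu
    rcases List.mem_append.1 hu with hu1 | hu2
    · obtain ⟨s, t1, rfl⟩ := List.append_of_mem hu1
      refine ⟨u, t, s, t1, l₂, by simp [hl], pvNum_symm t u ▸ hq, pvSP_symm t u⟩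
    · obtain ⟨s, t2, rfl⟩ := List.append_of_mem hu2
      refine ⟨t, u, l₁, s, t2, by simp [hl], hq, rfl⟩
  · rintro ⟨t, u, xs, ys, zs, hl, hq, rfl⟩
    have ht : t ∈ l := by rw [hl]; simp
    refine ⟨t, ht, u, ?_, hq, rfl⟩
    by_cases htu : u = t
    · subst htu
      have hc : 2 ≤ l.count u := by
        rw [hl]
        simp [List.count_append, List.count_cons_self]
        omega
      have : 0 < (l.erase u).count u := by
        rw [List.count_erase_self]
        omega
      exact List.count_pos_iff.1 this
    · rw [List.mem_erase_of_ne htu]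
      rw [hl]
      simp

theorem B_mem_iff_PS (l : List (List Int)) (x : List (List Int)) :
    (∃ a b : Nat, ∃ (hb : b < l.length) (ha : a < l.length),
        a < b ∧ pvNum l[a] l[b] = 2 ∧ x = pvSP l[a] l[b]) ↔ pvPS l x := by
  constructor
  · rintro ⟨a, b, hb, _ha, hab, hq, rfl⟩
    obtain ⟨xs, ys, zs, hl⟩ := pvIdxSplit l a b hab hb
    exact ⟨l[a], l[b], xs, ys, zs, hl, hq, rfl⟩
  · rintro ⟨t, u, xs, ys, zs, hl, hq, rfl⟩
    obtain ⟨a, b, hb, ha, hab, he1, he2⟩ := pvSplitIdx l t u xs ys zs hl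
    have e1 : l[a] = t := by
      have h0 := List.getElem?_eq_getElem ha
      rw [he1] at h0
      exact Option.some.inj h0.symm
    have e2 : l[b] = u := by
      have h0 := List.getElem?_eq_getElem hb
      rw [he2] at h0
      exact Option.some.inj h0.symm
    exact ⟨a, b, hb, ha, hab, by rw [e1, e2]; exact hq, by rw [e1, e2]⟩

-- ===== VERDICT (by name: the statement is the Claim_ definition above) =====
theorem findNeighbourTriangles_spec : Claim_equal_findNeighbourTriangles := by
  intro l _
  unfold Spec_findNeighbourTriangles
  obtain ⟨hnA, hpA, hmA⟩ := A_char l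
  obtain ⟨r, hr, hnR, hmR⟩ := B_char l
  rw [hr]
  have hnB : (PySem.List.sorted r (fun x => x)).Nodup :=
    ((PySem.List.sorted_perm r (fun x => x) false).nodup_iff).2 hnR
  have hpB : (PySem.List.sorted r (fun x => x)).Pairwise (fun a b => a ≤ b) := by
    rw [pvSortedInst2]
    exact PySem.List.sorted_pairwise _ _
  refine PySem.List.eq_of_perm_of_pairwise_le_of_injective (fun x => x) (fun _ _ h => h) ?_ hpA hpB
  refine (List.perm_ext_iff_of_nodup hnA hnB).2 ?_
  intro x
  rw [hmA x, A_mem_iff_PS, PySem.List.mem_sorted, hmR x, B_mem_iff_PS]
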